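-- pv_equiv track=rewrite | github.com/pypi-data/pypi-mirror-303 | packages/collar/collar-0.1.15.tar.gz/collar-0.1.15/collar/core/ast/JSource.py | find_indentation_string_after_newline
-- ===== SOURCE A (Python) =====
-- def find_indentation_string_after_newline(text: str):
--     newline_index = text.find('\n')
--     if newline_index == -1:
--         return None
--     after_newline = text[newline_index + 1:]
--     indentation = ''
--     for char in after_newline:
--         if char == ' ' or char == '\t':
--             indentation += char
--         else:
--             break
--     return indentation
-- ===== SOURCE B (Python) =====
-- def find_indentation_string_after_newline(text: str):
--     newline_index = text.find('\n')
--     if newline_index == -1: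
--         return None
--     after = text[newline_index + 1:]
--     return after[:len(after) - len(after.lstrip(' \t'))]
-- ===== Notes on version B (the rewrite author's own statement) =====
-- stated objective: simpler
-- what changed: Replaces the char-by-char accumulate-and-break loop with a boundary computed once: the indentation is the prefix that left-stripping spaces and tabs removes, taken by a single slice.
import Mathlib
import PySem

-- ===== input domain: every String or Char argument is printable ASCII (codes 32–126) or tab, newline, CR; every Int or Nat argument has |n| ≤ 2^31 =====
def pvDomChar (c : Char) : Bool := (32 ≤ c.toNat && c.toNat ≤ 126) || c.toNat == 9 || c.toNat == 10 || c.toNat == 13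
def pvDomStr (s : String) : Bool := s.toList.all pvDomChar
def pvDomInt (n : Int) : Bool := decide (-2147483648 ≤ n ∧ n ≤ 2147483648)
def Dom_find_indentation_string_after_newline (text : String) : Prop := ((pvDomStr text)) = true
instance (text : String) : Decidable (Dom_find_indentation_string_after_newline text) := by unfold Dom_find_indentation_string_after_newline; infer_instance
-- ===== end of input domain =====

-- B computes the indentation as the slice that lstrip(' \t') removes instead of A's
-- accumulate-and-break character loop; same value everywhere (simpler decomposition).

-- ===== PORT A =====
-- the 'for char in after_newline: … break' loop, with the accumulated indentation
def pvIndentLoop : List Char → List Char → List Char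
  | [], acc => acc
  | c :: rest, acc => if c == ' ' || c == '\t' then pvIndentLoop rest (acc ++ [c]) else acc

def find_indentation_string_after_newline (text : String) : Option String :=
  let newline_index := PySem.Str.find text "\n"
  if newline_index == -1 then none
  else
    let after_newline := PySem.List.slice text.toList (some (newline_index + 1)) none
    some (String.mk (pvIndentLoop after_newline []))

-- ===== PORT B =====
def find_indentation_string_after_newline_alt (text : String) : Option String :=
  let newline_index := PySem.Str.find text "\n"
  if newline_index == -1 then none
  else
    let after := PySem.List.slice text.toList (some (newline_index + 1)) none
    -- after.lstrip(' \t'): drop the leading chars that are in {' ', '\t'} (exact for lstrip with chars)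
    let stripped := after.dropWhile (fun c => c == ' ' || c == '\t')
    some (String.mk (PySem.List.slice after none (some ((after.length : Int) - stripped.length))))

-- ===== PRECONDITION & SPEC =====
def Spec_find_indentation_string_after_newline (text : String) (out : Option String) : Prop := out = find_indentation_string_after_newline_alt text
instance (text : String) (out : Option String) : Decidable (Spec_find_indentation_string_after_newline text out) := by unfold Spec_find_indentation_string_after_newline; infer_instance

-- ===== CLAIM (what is proved, stated in full; the proofs are below) =====
def Claim_equal_find_indentation_string_after_newline : Prop := ∀ (text : String), Dom_find_indentation_string_after_newline text → Spec_find_indentation_string_after_newline text (find_indentation_string_after_newline text)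

-- ===== LEMMAS AND PROOFS =====
theorem pvIndentLoop_eq_takeWhile (l acc : List Char) :
    pvIndentLoop l acc = acc ++ l.takeWhile (fun c => c == ' ' || c == '\t') := by
  induction l generalizing acc with
  | nil => simp [pvIndentLoop]
  | cons c rest ih =>
    by_cases h : (c == ' ' || c == '\t') = true
    · simp [pvIndentLoop, h, ih]
    · simp [pvIndentLoop, h]

theorem take_sub_dropWhile {α : Type} (p : α → Bool) (l : List α) :
    l.take (l.length - (l.dropWhile p).length) = l.takeWhile p := by
  have hsplit := List.takeWhile_append_dropWhile (p := p) (l := l)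
  have hlen : l.length - (l.dropWhile p).length = (l.takeWhile p).length := by
    have := congrArg List.length hsplit
    simp only [List.length_append] at this
    omega
  rw [hlen]
  exact (List.prefix_iff_eq_take.mp (List.takeWhile_prefix p)).symm

-- ===== VERDICT (by name: the statement is the Claim_ definition above) =====
theorem find_indentation_string_after_newline_spec : Claim_equal_find_indentation_string_after_newline := by
  intro text _
  unfold Spec_find_indentation_string_after_newline
  unfold find_indentation_string_after_newline find_indentation_string_after_newline_alt
  by_cases h : (PySem.Str.find text "\n" == -1) = true
  · simp only [h, if_true]
  · simp only [h, Bool.false_eq_true, if_false]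
    set after := PySem.List.slice text.toList (some (PySem.Str.find text "\n" + 1)) none with hafter
    have hle : (after.dropWhile (fun c => c == ' ' || c == '\t')).length ≤ after.length :=
      List.length_dropWhile_le _ _
    have hnn : (0:Int) ≤ (after.length : Int) - ((after.dropWhile (fun c => c == ' ' || c == '\t')).length : Int) := by
      omega
    rw [PySem.List.slice_to]
    have htn : ((after.length : Int) - ((after.dropWhile (fun c => c == ' ' || c == '\t')).length : Int)).toNat
        = after.length - (after.dropWhile (fun c => c == ' ' || c == '\t')).length := by omega
    rw [htn, take_sub_dropWhile, pvIndentLoop_eq_takeWhile]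
    · simp
    · exact hnn
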